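-- pv_equiv track=rewrite | github.com/little-csy/LeetCode | greedy/lexicographically-smallest-negated-permutation-that-sums-to-target.py | lexSmallestNegatedPerm
-- ===== SOURCE A (Python) =====
-- from typing import List
--
-- def lexSmallestNegatedPerm(n: int, target: int) -> List[int]:
--     sumn = 0
--     res = []
--     sumn = (1+n)*n//2
--     if (sumn-target) %2 == 1:
--         return []
--     sumneg = (sumn-target)//2
--     if sumneg <0 or sumneg > sumn:
--         return []
--     neg = [False]*(n+1)
--
--     for j in range(n, 0, -1):
--         if j<= sumneg:
--             res.append(-j)
--             neg[j] = True
--             sumneg -= j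
--
--     for k in range(1,n+1):
--         if not neg[k]:
--             res.append(k)
--
--     return res
-- ===== SOURCE B (Python) =====
-- from typing import List
--
-- def _isqrt(x: int) -> int:
--     # floor integer square root via Newton iteration (x >= 1)
--     g = x
--     nxt = (g + x // g) // 2
--     while nxt < g:
--         g = nxt
--         nxt = (g + x // g) // 2
--     return g
--
-- def lexSmallestNegatedPerm(n: int, target: int) -> List[int]:
--     if n <= 0:
--         return []
--     sumn = n * (n + 1) // 2
--     d = sumn - target
--     if d % 2 or d < 0 or d > 2 * sumn:
--         return []
--     s = d // 2
--     # negated set = {n, n-1, ..., n-m+1} plus remainder r, by closed form: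
--     # m = largest count with n+(n-1)+...+(n-m+1) <= s, solved via the quadratic formula
--     t = 2 * n + 1
--     q = _isqrt(t * t - 8 * s)
--     m = (t - q) // 2
--     if m * t - m * m > 2 * s:
--         m -= 1
--     r = s - (m * t - m * m) // 2
--     res = list(range(-n, -(n - m)))
--     if r > 0:
--         res.append(-r)
--         res += list(range(1, r))
--         res += list(range(r + 1, n - m + 1))
--     else:
--         res += list(range(1, n - m + 1))
--     return res
-- ===== Notes on version B (the rewrite author's own statement) =====
-- stated objective: alternative
-- what changed: A's descending greedy scan over range(n,0,-1) with a boolean mark array and a second membership-scan pass is replaced by a closed-form construction: the size m of the negated top run is computed arithmetically from the triangular-number quadratic via an integer square root (Newton iteration), and the output is assembled directly from ranges (-n..-(n-m+1), the remainder -r, then 1..r-1 and r+1..n-m).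
import Mathlib
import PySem

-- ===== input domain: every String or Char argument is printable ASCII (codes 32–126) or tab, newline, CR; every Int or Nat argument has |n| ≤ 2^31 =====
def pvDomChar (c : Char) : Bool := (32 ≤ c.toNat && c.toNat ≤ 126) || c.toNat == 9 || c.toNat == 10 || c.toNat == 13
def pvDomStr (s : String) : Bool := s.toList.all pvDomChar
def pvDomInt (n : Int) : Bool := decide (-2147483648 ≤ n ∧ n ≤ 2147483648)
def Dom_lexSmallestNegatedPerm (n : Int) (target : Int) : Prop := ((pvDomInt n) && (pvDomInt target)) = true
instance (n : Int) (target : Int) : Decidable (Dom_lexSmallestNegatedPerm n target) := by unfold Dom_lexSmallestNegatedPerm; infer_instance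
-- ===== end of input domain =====

-- B replaces A's descending greedy scan and boolean mark array by a closed-form
-- construction: the negated block is computed arithmetically (triangular numbers via an
-- integer square root) and the output assembled from ranges; objective: alternative.

-- ===== PORT A =====
def lexSmallestNegatedPerm (n : Int) (target : Int) : List Int :=
  let sumn := PySem.Int.floordiv ((1 + n) * n) 2
  if PySem.Int.mod (sumn - target) 2 = 1 then []
  else
    let sumneg := PySem.Int.floordiv (sumn - target) 2
    if sumneg < 0 ∨ sumneg > sumn then []
    else
      -- neg = [False]*(n+1)  (empty for n+1 ≤ 0, as in Python)
      let neg : List Bool := List.replicate (n + 1).toNat false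
      -- for j in range(n, 0, -1): ...   state (res, neg, sumneg)
      -- neg[j] = True ported as List.set at j.toNat: exact, since 1 ≤ j ≤ n < len(neg)
      let st := (PySem.List.pyRange n 0 (-1)).foldl
        (fun (st : List Int × List Bool × Int) j =>
          if j ≤ st.2.2 then (st.1 ++ [-j], st.2.1.set j.toNat true, st.2.2 - j)
          else st) ([], neg, sumneg)
      -- for k in range(1, n+1): if not neg[k]: res.append(k)
      -- neg[k] ported as pyGetD: exact, since 1 ≤ k ≤ n < len(neg)
      (PySem.List.pyRange 1 (n + 1) 1).foldl
        (fun res k => if PySem.List.pyGetD st.2.1 k false = false then res ++ [k] else res)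
        st.1

-- ===== PORT B =====
-- _isqrt: Newton iteration; the while loop runs at most x.toNat times (the guess
-- strictly decreases each iteration), so this fuel makes the same computation total.
def isqrtAux (x : Int) : Nat → Int → Int
  | 0, g => g
  | fuel + 1, g =>
    let nxt := PySem.Int.floordiv (g + PySem.Int.floordiv x g) 2
    if nxt < g then isqrtAux x fuel nxt else g

def pyIsqrt (x : Int) : Int := isqrtAux x x.toNat x

def lexSmallestNegatedPerm_alt (n : Int) (target : Int) : List Int :=
  if n ≤ 0 then []
  else
    let sumn := PySem.Int.floordiv (n * (n + 1)) 2
    let d := sumn - target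
    if PySem.Int.mod d 2 ≠ 0 ∨ d < 0 ∨ d > 2 * sumn then []
    else
      let s := PySem.Int.floordiv d 2
      let t := 2 * n + 1
      let q := pyIsqrt (t * t - 8 * s)
      let m0 := PySem.Int.floordiv (t - q) 2
      let m := if m0 * t - m0 * m0 > 2 * s then m0 - 1 else m0
      let r := s - PySem.Int.floordiv (m * t - m * m) 2
      let res := PySem.List.pyRange (-n) (-(n - m)) 1
      if r > 0 then
        res ++ [-r] ++ PySem.List.pyRange 1 r 1 ++ PySem.List.pyRange (r + 1) (n - m + 1) 1
      else
        res ++ PySem.List.pyRange 1 (n - m + 1) 1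

-- ===== PRECONDITION & SPEC =====
def Spec_lexSmallestNegatedPerm (n : Int) (target : Int) (out : List Int) : Prop := out = lexSmallestNegatedPerm_alt n target
instance (n : Int) (target : Int) (out : List Int) : Decidable (Spec_lexSmallestNegatedPerm n target out) := by unfold Spec_lexSmallestNegatedPerm; infer_instance

-- ===== CLAIM (what is proved, stated in full; the proofs are below) =====
def Claim_equal_lexSmallestNegatedPerm : Prop := ∀ (n : Int) (target : Int), Dom_lexSmallestNegatedPerm n target → Spec_lexSmallestNegatedPerm n target (lexSmallestNegatedPerm n target)

-- ===== LEMMAS AND PROOFS =====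

-- the greedy selection of A's first loop, as a recursion on n
def negsSpec : Nat → Int → List Int
  | 0, _ => []
  | k + 1, s =>
    if ((k : Int) + 1) ≤ s then ((k : Int) + 1) :: negsSpec k (s - ((k : Int) + 1))
    else negsSpec k s

theorem loop1_char (k : Nat) (s : Int) (res : List Int) (arr : List Bool) :
    (PySem.List.pyRange (k : Int) 0 (-1)).foldl
      (fun (st : List Int × List Bool × Int) j =>
        if j ≤ st.2.2 then (st.1 ++ [-j], st.2.1.set j.toNat true, st.2.2 - j)
        else st) (res, arr, s)
    = (res ++ (negsSpec k s).map (fun j => -j),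
       (negsSpec k s).foldl (fun a j => a.set j.toNat true) arr,
       s - (negsSpec k s).sum) := by
  induction k generalizing s res arr with
  | zero => simp [PySem.List.pyRange_neg_one_eq_nil, negsSpec]
  | succ k ih =>
    rw [PySem.List.pyRange_neg_one_cons (by exact_mod_cast Nat.succ_pos k)]
    have hc : ((k + 1 : Nat) : Int) - 1 = (k : Int) := by push_cast; ring
    rw [List.foldl_cons, hc]
    simp only [negsSpec]
    push_cast
    by_cases h : ((k : Int) + 1) ≤ s
    · simp only [h, if_pos]
      rw [ih]
      simp [List.append_assoc]
      ring
    · simp only [h, if_false]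
      rw [ih]

theorem negsSpec_mem (k : Nat) (s : Int) (j : Int) (h : j ∈ negsSpec k s) :
    1 ≤ j ∧ j ≤ k := by
  induction k generalizing s with
  | zero => simp [negsSpec] at h
  | succ k ih =>
    simp only [negsSpec] at h
    split at h
    · rcases List.mem_cons.1 h with h | h
      · subst h; constructor <;> push_cast <;> omega
      · have := ih _ h; push_cast; omega
    · have := ih _ h; push_cast; omega

-- reading the mark array: an index not in the set kept its value
theorem get_setAll_not_mem (L : List Int) (arr : List Bool) (k : Int)
    (hk : 0 ≤ k) (hL : ∀ j ∈ L, 0 ≤ j) (hne : k ∉ L) :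
    PySem.List.pyGetD (L.foldl (fun a j => a.set j.toNat true) arr) k false
      = PySem.List.pyGetD arr k false := by
  induction L generalizing arr with
  | nil => rfl
  | cons j L ih =>
    rw [List.foldl_cons, ih _ (fun x hx => hL x (List.mem_cons_of_mem _ hx))
        (fun h => hne (List.mem_cons_of_mem _ h))]
    rw [PySem.List.pyGetD_of_nonneg _ _ hk, PySem.List.pyGetD_of_nonneg _ _ hk]
    have hj : 0 ≤ j := hL j List.mem_cons_self
    have hne' : k.toNat ≠ j.toNat := by
      intro h
      exact hne (by have : k = j := by omega
                    simp [this, List.mem_cons])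
    rw [List.getD_eq_getElem?_getD, List.getD_eq_getElem?_getD, List.getElem?_set_ne (by omega)]

theorem get_setAll_mem (L : List Int) (arr : List Bool) (k : Int)
    (hk : 0 ≤ k) (hL : ∀ j ∈ L, 0 ≤ j ∧ j.toNat < arr.length) (hmem : k ∈ L) :
    PySem.List.pyGetD (L.foldl (fun a j => a.set j.toNat true) arr) k false = true := by
  induction L generalizing arr with
  | nil => simp at hmem
  | cons j L ih =>
    rw [List.foldl_cons]
    by_cases h : k ∈ L
    · exact ih (arr.set j.toNat true)
        (fun x hx => by have := hL x (List.mem_cons_of_mem _ hx); simpa using this) h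
    · have hkj : k = j := by
        rcases List.mem_cons.1 hmem with h' | h'
        · exact h'
        · exact absurd h' h
      subst hkj
      have hlen := hL k List.mem_cons_self
      rw [get_setAll_not_mem L _ k hk (fun x hx => (hL x (List.mem_cons_of_mem _ hx)).1) h]
      rw [PySem.List.pyGetD_of_nonneg _ _ hk]
      simp [List.getD, hlen.2]

theorem isqrtAux_spec (x : Int) (fuel : Nat) (g : Int)
    (hx : 1 ≤ x) (hg1 : 1 ≤ g) (hgf : g ≤ (fuel : Int) + 1)
    (hup : x < (g + 1) * (g + 1)) :
    1 ≤ isqrtAux x fuel g ∧ isqrtAux x fuel g * isqrtAux x fuel g ≤ x ∧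
      x < (isqrtAux x fuel g + 1) * (isqrtAux x fuel g + 1) := by
  induction fuel generalizing g with
  | zero =>
    have hg : g = 1 := by omega
    subst hg
    refine ⟨le_refl _, by simpa using hx, by simpa using hup⟩
  | succ fuel ih =>
    rw [isqrtAux]
    set f := PySem.Int.floordiv x g with hf
    set nxt := PySem.Int.floordiv (g + f) 2 with hnxt
    have hgpos : (0 : Int) < g := by omega
    have hfe : f = x / g := by rw [hf, PySem.Int.floordiv_eq_ediv_of_pos hgpos]
    have hne : nxt = (g + f) / 2 := by rw [hnxt, PySem.Int.floordiv_eq_ediv_of_pos (by norm_num)]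
    -- x = g * f + r1, 0 ≤ r1 < g
    have hxd : g * f + x % g = x := by rw [hfe]; exact Int.ediv_add_emod x g
    have hr1a : 0 ≤ x % g := Int.emod_nonneg x (by omega)
    have hr1b : x % g < g := Int.emod_lt_of_pos x hgpos
    have hnd : 2 * nxt + (g + f) % 2 = g + f := by rw [hne]; exact Int.ediv_add_emod (g + f) 2
    have hr2a : 0 ≤ (g + f) % 2 := Int.emod_nonneg _ (by norm_num)
    have hr2b : (g + f) % 2 < 2 := Int.emod_lt_of_pos _ (by norm_num)
    have hf0 : 0 ≤ f := by rw [hfe]; exact Int.ediv_nonneg (by omega) (by omega)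
    by_cases hlt : nxt < g
    · rw [if_pos hlt]
      -- recurse: establish the invariant for nxt
      have hn1 : 1 ≤ nxt := by nlinarith [hxd, hr1a, hr1b, hnd, hr2a, hr2b, hf0]
      have hnup : x < (nxt + 1) * (nxt + 1) := by nlinarith [hxd, hr1a, hr1b, hnd, hr2a, hr2b, sq_nonneg (g - f - 1)]
      exact ih nxt hn1 (by push_cast at hgf ⊢; omega) hnup
    · rw [if_neg hlt]
      refine ⟨hg1, ?_, hup⟩
      by_contra hgg
      push_neg at hgg
      -- x < g*g forces f < g hence nxt < g, contradiction
      have hfg : f < g := by nlinarith [hxd, hr1a]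
      exact hlt (by omega)

theorem pyIsqrt_spec (x : Int) (hx : 1 ≤ x) :
    1 ≤ pyIsqrt x ∧ pyIsqrt x * pyIsqrt x ≤ x ∧
      x < (pyIsqrt x + 1) * (pyIsqrt x + 1) := by
  refine isqrtAux_spec x x.toNat x hx hx (by omega) (by nlinarith)

-- closed form of the greedy: top run of mm elements plus a remainder r
theorem negsSpec_closed (n : Nat) (s mm r : Int)
    (hs0 : 0 ≤ s) (hsT : 2 * s ≤ (n : Int) * (n + 1))
    (hm0 : 0 ≤ mm) (hmn : mm ≤ (n : Int))
    (hrun : mm * (2 * n + 1 - mm) ≤ 2 * s)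
    (hmax : mm = (n : Int) ∨ 2 * s < (mm + 1) * (2 * n - mm))
    (hr : 2 * r = 2 * s - mm * (2 * n + 1 - mm)) :
    negsSpec n s = PySem.List.pyRange n ((n : Int) - mm) (-1)
      ++ (if 0 < r then [r] else []) := by
  induction n generalizing s mm r with
  | zero =>
    have hmm : mm = 0 := by omega
    subst hmm
    have hs : s = 0 := by omega
    have hrr : r = 0 := by omega
    subst hs; subst hrr
    simp [negsSpec, PySem.List.pyRange_neg_one_eq_nil]
  | succ n ih =>
    have hN : ((n + 1 : Nat) : Int) = (n : Int) + 1 := by push_cast; ring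
    simp only [negsSpec]
    by_cases h : ((n : Int) + 1) ≤ s
    · -- greedy takes n+1; mm ≥ 1
      rw [if_pos h]
      have hmm1 : 1 ≤ mm := by
        by_contra hc
        have hmm : mm = 0 := by omega
        subst hmm
        rcases hmax with h1 | h2
        · omega
        · simp at h2; omega
      have hrec := ih (s - ((n : Int) + 1)) (mm - 1) r
        (by omega)
        (by push_cast at hsT ⊢; nlinarith)
        (by omega) (by push_cast at hmn ⊢; omega)
        (by push_cast at hrun ⊢; nlinarith)
        (by rcases hmax with h1 | h2
            · left; push_cast at h1 ⊢; omega
            · right; push_cast at h2 ⊢; nlinarith)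
        (by push_cast at hr ⊢; nlinarith)
      rw [hrec]
      push_cast
      have he : (n : Int) + 1 - mm = (n : Int) - (mm - 1) := by ring
      rw [he]
      have hcons : PySem.List.pyRange ((n : Int) + 1) ((n : Int) - (mm - 1)) (-1)
          = ((n : Int) + 1) :: PySem.List.pyRange ((n : Int)) ((n : Int) - (mm - 1)) (-1) := by
        have h2 := PySem.List.pyRange_neg_one_cons
          (a := (n : Int) + 1) (b := (n : Int) - (mm - 1)) (by omega)
        have h3 : (n : Int) + 1 - 1 = (n : Int) := by ring
        rw [h2, h3]
      rw [hcons]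
      simp
    · -- greedy skips n+1; mm = 0
      rw [if_neg h]
      have hmm : mm = 0 := by
        by_contra hc
        have h1 : 1 ≤ mm := by omega
        push_cast at hrun hmn
        nlinarith
      subst hmm
      have hrs : r = s := by omega
      have hnil : PySem.List.pyRange ((n + 1 : Nat) : Int) (((n + 1 : Nat) : Int) - 0) (-1) = [] := by
        apply PySem.List.pyRange_neg_one_eq_nil; omega
      by_cases hsn : s = (n : Int) ∧ 1 ≤ s
      · -- s equals n ≥ 1 : top run of length 1 on the smaller instance
        have hrec := ih s 1 0
          (by omega) (by push_cast; nlinarith [hsn.1, hsn.2])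
          (by omega) (by omega)
          (by push_cast; omega)
          (by rcases eq_or_lt_of_le (show (1:Int) ≤ (n:Int) by omega) with h1 | h2
              · left; omega
              · right; push_cast; nlinarith)
          (by push_cast; omega)
        rw [hrec, hnil]
        rw [PySem.List.pyRange_neg_one_cons (by omega),
            PySem.List.pyRange_neg_one_eq_nil (by omega)]
        simp [hsn.1, hrs]
        obtain ⟨h1, h2⟩ := hsn; omega
      · -- s < n (or s = n = 0): nothing further is taken
        have hs' : s < (n : Int) ∨ (s = 0 ∧ (n : Int) = 0) := by
          rcases lt_or_ge s (n : Int) with h1 | h1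
          · left; exact h1
          · right; constructor <;> omega
        have hrec := ih s 0 s
          (by omega)
          (by rcases hs' with h1 | h1
              · push_cast; nlinarith
              · rw [h1.2]; norm_num [h1.1])
          (by omega) (by omega) (by omega)
          (by rcases hs' with h1 | h1
              · right; omega
              · left; omega)
          (by omega)
        rw [hrec, hnil]
        rw [PySem.List.pyRange_neg_one_eq_nil (by omega)]
        simp [hrs]

theorem loop1_char' (nn : Int) (hnn : 0 ≤ nn) (s : Int) (res : List Int) (arr : List Bool) :
    (PySem.List.pyRange nn 0 (-1)).foldl
      (fun (st : List Int × List Bool × Int) j =>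
        if j ≤ st.2.2 then (st.1 ++ [-j], st.2.1.set j.toNat true, st.2.2 - j)
        else st) (res, arr, s)
    = (res ++ (negsSpec nn.toNat s).map (fun j => -j),
       (negsSpec nn.toNat s).foldl (fun a j => a.set j.toNat true) arr,
       s - (negsSpec nn.toNat s).sum) := by
  have h : nn = ((nn.toNat : Nat) : Int) := by omega
  rw [h, loop1_char]
  rw [Int.toNat_natCast]


theorem map_neg_pyRange (a b : Int) :
    (PySem.List.pyRange a b (-1)).map (fun j => -j) = PySem.List.pyRange (-a) (-b) 1 := by
  rw [PySem.List.pyRange_neg_one, PySem.List.pyRange_one]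
  rw [List.map_map]
  have hlen : (a - b).toNat = (-b - -a).toNat := by omega
  rw [← hlen]
  apply List.map_congr_left
  intro k _
  simp; ring

theorem m_facts (n s : Int) (hn : 1 ≤ n) (hs0 : 0 ≤ s) (hsT : 2 * s ≤ n * (n + 1))
    (m : Int)
    (hm : m = (if PySem.Int.floordiv (2 * n + 1 - pyIsqrt ((2*n+1)*(2*n+1) - 8*s)) 2 * (2*n+1)
                  - PySem.Int.floordiv (2 * n + 1 - pyIsqrt ((2*n+1)*(2*n+1) - 8*s)) 2
                    * PySem.Int.floordiv (2 * n + 1 - pyIsqrt ((2*n+1)*(2*n+1) - 8*s)) 2 > 2 * s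
               then PySem.Int.floordiv (2 * n + 1 - pyIsqrt ((2*n+1)*(2*n+1) - 8*s)) 2 - 1
               else PySem.Int.floordiv (2 * n + 1 - pyIsqrt ((2*n+1)*(2*n+1) - 8*s)) 2)) :
    0 ≤ m ∧ m ≤ n ∧ m * (2 * n + 1 - m) ≤ 2 * s ∧ (m = n ∨ 2 * s < (m + 1) * (2 * n - m)) := by
  set t := 2 * n + 1 with ht
  set x := t * t - 8 * s with hx
  have hx1 : 1  ≤ x := by nlinarith
  obtain ⟨hq1, hq2, hq3⟩ := pyIsqrt_spec x hx1
  set q := pyIsqrt x with hq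
  set m0 := PySem.Int.floordiv (t - q) 2 with hm0
  have hdiv := PySem.Int.floordiv_mul_add_mod (t - q) 2
  have hmod := PySem.Int.mod_two_eq (t - q)
  set e := PySem.Int.mod (t - q) 2 with he
  have he01 : e = 0 ∨ e = 1 := hmod
  have h2m0 : m0 * 2 + e = t - q := hdiv
  have hqt : q ≤ t := by nlinarith
  have hm00 : 0 ≤ m0 := by omega
  have hkey : ∀ z : Int, z * (t - z) ≤ 2 * s ↔ x ≤ (t - 2*z) * (t - 2*z) := by
    intro z; constructor <;> intro hz <;> nlinarith
  by_cases htest : m0 * t - m0 * m0 > 2 * s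
  · -- correction: m = m0 - 1; the test says run(m0) > 2s, so t - 2*m0 = q and e = 0
    rw [if_pos htest] at hm
    have hrun0 : ¬ (m0 * (t - m0) ≤ 2 * s) := by intro hc; apply absurd htest; push_neg; nlinarith
    have hsq : (t - 2*m0) * (t - 2*m0) < x := by
      by_contra hc; push_neg at hc; exact hrun0 ((hkey m0).2 hc)
    have he0 : e = 0 := by
      rcases he01 with h0 | h1
      · exact h0
      · exfalso; nlinarith
    have hm01 : 1 ≤ m0 := by
      by_contra hc
      have : m0 = 0 := by omega
      rw [this] at htest; simp at htest; omega
    subst hm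
    refine ⟨by omega, by omega, ?_, ?_⟩
    · have : x ≤ (t - 2*(m0-1)) * (t - 2*(m0-1)) := by nlinarith
      have h4 := (hkey (m0 - 1)).2 this
      nlinarith
    · right; nlinarith
  · rw [if_neg htest] at hm
    push_neg at htest
    have hrun : m0 * (t - m0) ≤ 2 * s := by nlinarith
    have hm0n : m0 ≤ n := by omega
    subst hm
    refine ⟨hm00, hm0n, by linarith [hrun], ?_⟩
    by_cases hmn : m0 = n
    · exact Or.inl hmn
    · right
      have ht2 : t - 2*(m0+1) = q + e - 2 := by omega
      have hsq : (t - 2*(m0+1)) * (t - 2*(m0+1)) < x := by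
        rw [ht2]
        rcases he01 with h0 | h1
        · -- t - 2 m0 = q ; if q = 1 then m0 = n, excluded
          have hq2' : 2 ≤ q := by
            by_contra hc
            have : q = 1 := by omega
            omega
          rw [h0]; nlinarith
        · rw [h1]; nlinarith
      by_contra hc
      push_neg at hc
      have h5 : (m0 + 1) * (t - (m0 + 1)) ≤ 2 * s := by nlinarith
      have h6 := (hkey (m0 + 1)).1 h5
      linarith

theorem main_eq (n s : Int) (hn : 1 ≤ n) (hs0 : 0 ≤ s) (hsT : 2 * s ≤ n * (n + 1)) :
    ((PySem.List.pyRange 1 (n + 1) 1).foldl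
      (fun res k => if PySem.List.pyGetD
          ((PySem.List.pyRange n 0 (-1)).foldl
            (fun (st : List Int × List Bool × Int) j =>
              if j ≤ st.2.2 then (st.1 ++ [-j], st.2.1.set j.toNat true, st.2.2 - j) else st)
            ([], List.replicate (n + 1).toNat false, s)).2.1 k false = false
        then res ++ [k] else res)
      ((PySem.List.pyRange n 0 (-1)).foldl
        (fun (st : List Int × List Bool × Int) j =>
          if j ≤ st.2.2 then (st.1 ++ [-j], st.2.1.set j.toNat true, st.2.2 - j) else st)
        ([], List.replicate (n + 1).toNat false, s)).1)
    = (let t := 2 * n + 1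
       let q := pyIsqrt (t * t - 8 * s)
       let m0 := PySem.Int.floordiv (t - q) 2
       let m := if m0 * t - m0 * m0 > 2 * s then m0 - 1 else m0
       let r := s - PySem.Int.floordiv (m * t - m * m) 2
       let res := PySem.List.pyRange (-n) (-(n - m)) 1
       if r > 0 then
         res ++ [-r] ++ PySem.List.pyRange 1 r 1 ++ PySem.List.pyRange (r + 1) (n - m + 1) 1
       else
         res ++ PySem.List.pyRange 1 (n - m + 1) 1) := by
  simp only []
  set m := (if PySem.Int.floordiv (2 * n + 1 - pyIsqrt ((2*n+1)*(2*n+1) - 8*s)) 2 * (2*n+1)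
                  - PySem.Int.floordiv (2 * n + 1 - pyIsqrt ((2*n+1)*(2*n+1) - 8*s)) 2
                    * PySem.Int.floordiv (2 * n + 1 - pyIsqrt ((2*n+1)*(2*n+1) - 8*s)) 2 > 2 * s
               then PySem.Int.floordiv (2 * n + 1 - pyIsqrt ((2*n+1)*(2*n+1) - 8*s)) 2 - 1
               else PySem.Int.floordiv (2 * n + 1 - pyIsqrt ((2*n+1)*(2*n+1) - 8*s)) 2) with hmdef
  obtain ⟨hm0, hmn, hrun, hmax⟩ := m_facts n s hn hs0 hsT m hmdef
  -- r and its parity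
  obtain ⟨c, hc⟩ : Even ((m - 1) * m) := by
    have := Int.even_mul_succ_self (m - 1)
    simpa using this
  have hfd : PySem.Int.floordiv (m * (2 * n + 1) - m * m) 2 = m * n - c := by
    have h1 : m * (2 * n + 1) - m * m = (m * n - c) * 2 := by linear_combination -hc
    rw [h1, PySem.Int.floordiv_eq_ediv_of_pos (by norm_num)]
    exact Int.mul_ediv_cancel _ (by norm_num)
  set r := s - PySem.Int.floordiv (m * (2 * n + 1) - m * m) 2 with hrdef
  have hr2 : 2 * r = 2 * s - m * (2 * n + 1 - m) := by rw [hrdef, hfd]; linear_combination -hc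
  have hr0 : 0 ≤ r := by nlinarith
  have hrlt : m < n → r < n - m := by
    intro hlt
    rcases hmax with h1 | h2
    · omega
    · nlinarith
  have hrn : m = n → r = 0 := by intro h1; nlinarith
  -- the loop characterization
  rw [loop1_char' n (by omega) s [] (List.replicate (n + 1).toNat false)]
  simp only [List.nil_append]
  set L := negsSpec n.toNat s with hLdef
  have hcast : ((n.toNat : Nat) : Int) = n := by omega
  have hclosed : L = PySem.List.pyRange n (n - m) (-1) ++ (if 0 < r then [r] else []) := by
    have := negsSpec_closed n.toNat s m r hs0 (by rw [hcast]; exact hsT) hm0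
      (by rw [hcast]; exact hmn) (by rw [hcast]; exact hrun)
      (by rw [hcast]; exact hmax) (by rw [hcast]; exact hr2)
    rw [hLdef, this, hcast]
  have hLmem : ∀ j ∈ L, 1 ≤ j ∧ j ≤ n := by
    intro j hj
    have := negsSpec_mem n.toNat s j hj
    constructor
    · exact this.1
    · have h2 := this.2; rw [hcast] at h2; exact h2
  -- second loop: turn into a filter
  rw [PySem.List.foldl_append_ite_eq_filter (p := fun k => PySem.List.pyGetD
    (L.foldl (fun a j => a.set j.toNat true) (List.replicate (n + 1).toNat false)) k false = false)]
  -- the filter test is "k was not negated"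
  have hfilt : ∀ k ∈ PySem.List.pyRange 1 (n + 1) 1,
      (decide (PySem.List.pyGetD
        (L.foldl (fun a j => a.set j.toNat true) (List.replicate (n + 1).toNat false)) k false = false))
      = (decide (k ∉ L)) := by
    intro k hk
    rw [PySem.List.mem_pyRange_one] at hk
    by_cases hmem : k ∈ L
    · rw [get_setAll_mem L _ k (by omega)
        (fun j hj => by
          have := hLmem j hj
          refine ⟨by omega, ?_⟩
          rw [List.length_replicate]
          omega) hmem]
      simp [hmem]
    · rw [get_setAll_not_mem L _ k (by omega) (fun j hj => by have := hLmem j hj; omega) hmem]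
      have hget : PySem.List.pyGetD (List.replicate (n + 1).toNat false) k false = false := by
        rw [PySem.List.pyGetD_of_nonneg _ _ (by omega : (0:Int) ≤ k)]
        simp [List.getD]
      rw [hget]
      simp [hmem]
  rw [List.filter_congr hfilt]
  rw [hclosed, List.map_append, map_neg_pyRange]
  rw [PySem.List.pyRange_one_append 1 (n - m + 1) (n + 1) (by omega) (by omega), List.filter_append]
  by_cases hrpos : 0 < r
  · have hmltn : m < n := by
      rcases lt_or_eq_of_le hmn with h1 | h1
      · exact h1
      · exfalso; have := hrn h1; omega
    have hrnm : r < n - m := hrlt hmltn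
    rw [if_pos hrpos, if_pos (by omega : r > 0)]
    have hupper : (PySem.List.pyRange (n - m + 1) (n + 1) 1).filter
        (fun k => decide (k ∉ PySem.List.pyRange n (n - m) (-1) ++ [r])) = [] := by
      rw [List.filter_eq_nil_iff]
      intro k hk
      rw [PySem.List.mem_pyRange_one] at hk
      simp only [decide_eq_true_eq, not_not, List.mem_append, PySem.List.mem_pyRange_neg_one,
        List.mem_singleton]
      exact Or.inl ⟨by omega, by omega⟩
    rw [hupper, List.append_nil]
    rw [PySem.List.pyRange_one_append 1 r (n - m + 1) (by omega) (by omega), List.filter_append]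
    rw [PySem.List.pyRange_one_cons (by omega : r < n - m + 1)]
    have hlow : (PySem.List.pyRange 1 r 1).filter
        (fun k => decide (k ∉ PySem.List.pyRange n (n - m) (-1) ++ [r])) = PySem.List.pyRange 1 r 1 := by
      rw [List.filter_eq_self]
      intro k hk
      rw [PySem.List.mem_pyRange_one] at hk
      simp only [decide_eq_true_eq, List.mem_append, PySem.List.mem_pyRange_neg_one,
        List.mem_singleton]
      rintro (⟨h1, h2⟩ | h1) <;> omega
    have hmid : (List.filter
        (fun k => decide (k ∉ PySem.List.pyRange n (n - m) (-1) ++ [r]))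
        (r :: PySem.List.pyRange (r + 1) (n - m + 1) 1))
        = PySem.List.pyRange (r + 1) (n - m + 1) 1 := by
      rw [List.filter_cons_of_neg (by simp)]
      rw [List.filter_eq_self]
      intro k hk
      rw [PySem.List.mem_pyRange_one] at hk
      simp only [decide_eq_true_eq, List.mem_append, PySem.List.mem_pyRange_neg_one,
        List.mem_singleton]
      rintro (⟨h1, h2⟩ | h1) <;> omega
    rw [hlow, hmid]
    simp [List.append_assoc]
  · have hr00 : r = 0 := by omega
    rw [if_neg hrpos, if_neg (by omega : ¬ r > 0)]
    have hupper : (PySem.List.pyRange (n - m + 1) (n + 1) 1).filter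
        (fun k => decide (k ∉ PySem.List.pyRange n (n - m) (-1) ++ [])) = [] := by
      rw [List.filter_eq_nil_iff]
      intro k hk
      rw [PySem.List.mem_pyRange_one] at hk
      simp only [decide_eq_true_eq, not_not, List.mem_append, PySem.List.mem_pyRange_neg_one,
        List.not_mem_nil]
      exact Or.inl ⟨by omega, by omega⟩
    rw [hupper, List.append_nil]
    have hlow : (PySem.List.pyRange 1 (n - m + 1) 1).filter
        (fun k => decide (k ∉ PySem.List.pyRange n (n - m) (-1) ++ [])) = PySem.List.pyRange 1 (n - m + 1) 1 := by
      rw [List.filter_eq_self]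
      intro k hk
      rw [PySem.List.mem_pyRange_one] at hk
      simp only [decide_eq_true_eq, List.mem_append, PySem.List.mem_pyRange_neg_one,
        List.not_mem_nil]
      rintro (⟨h1, h2⟩ | h1) <;> omega
    rw [hlow]
    simp

-- ===== VERDICT (by name: the statement is the Claim_ definition above) =====
theorem lexSmallestNegatedPerm_spec : Claim_equal_lexSmallestNegatedPerm := by
  intro n target _
  show lexSmallestNegatedPerm n target = lexSmallestNegatedPerm_alt n target
  unfold lexSmallestNegatedPerm lexSmallestNegatedPerm_alt
  simp only []
  by_cases hn : n ≤ 0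
  · -- both loops of A run over empty ranges, so A returns [] on every branch
    rw [if_pos hn]
    rw [PySem.List.pyRange_neg_one_eq_nil hn, PySem.List.pyRange_one_eq_nil (by omega)]
    split_ifs <;> rfl
  · rw [if_neg hn]
    have hn1 : 1 ≤ n := by omega
    have hprod : (1 + n) * n = n * (n + 1) := by ring
    rw [hprod]
    obtain ⟨cT, hcT⟩ : Even (n * (n + 1)) := Int.even_mul_succ_self n
    have hTeq : PySem.Int.floordiv (n * (n + 1)) 2 = cT := by
      rw [show n * (n + 1) = cT * 2 by omega, PySem.Int.floordiv_eq_ediv_of_pos (by norm_num)]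
      exact Int.mul_ediv_cancel _ (by norm_num)
    set T := PySem.Int.floordiv (n * (n + 1)) 2 with hT
    have h2T : 2 * T = n * (n + 1) := by rw [hTeq]; omega
    set d := T - target with hd
    rcases PySem.Int.mod_two_eq d with hmod | hmod
    · -- d even: the parity guards of A and B both pass
      rw [if_neg (by rw [hmod]; norm_num)]
      have hdiv := PySem.Int.floordiv_mul_add_mod d 2
      set s := PySem.Int.floordiv d 2 with hs
      have h2s : 2 * s = d := by omega
      by_cases hg : s < 0 ∨ s > T
      · rw [if_pos hg, if_pos (by right; omega)]
      · rw [if_neg hg, if_neg (by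
          rintro (h1 | h2 | h3)
          · exact h1 hmod
          · omega
          · omega)]
        exact main_eq n s hn1 (by omega) (by omega)
    · -- d odd: both return []
      rw [if_pos hmod, if_pos (by left; rw [hmod]; norm_num)]
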